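-- pv_equiv track=rewrite | github.com/alexdundes/yoda | yoda/scripts/lib/provider_github.py | _deduplicate_logs
-- ===== SOURCE A (Python) =====
-- def _deduplicate_logs(entries: list[dict[str, str]]) -> list[dict[str, str]]:
--     # GitHub can return the same user comment both in /comments and in timeline as "commented".
--     # Prefer keeping the canonical "comment" entry and drop duplicate timeline copies.
--     best_by_key: dict[tuple[str, str], dict[str, str]] = {}
--     for entry in entries:
--         entry_id = entry.get("id", "")
--         entry_url = entry.get("url", "")
--         key = (entry_id, entry_url)
--         current = best_by_key.get(key)
--         if current is None:
--             best_by_key[key] = entry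
--             continue
--         current_is_comment = current.get("type") == "comment"
--         incoming_is_comment = entry.get("type") == "comment"
--         if incoming_is_comment and not current_is_comment:
--             best_by_key[key] = entry
--     return list(best_by_key.values())
-- ===== SOURCE B (Python) =====
-- def _deduplicate_logs(entries: list[dict[str, str]]) -> list[dict[str, str]]:
--     # Group entries by (id, url) in first-seen order, then pick each group's
--     # first "comment" entry, falling back to the group's first entry.
--     groups: dict[tuple[str, str], list[dict[str, str]]] = {}
--     for entry in entries:
--         groups.setdefault((entry.get("id", ""), entry.get("url", "")), []).append(entry)
--     return [
--         next((e for e in group if e.get("type") == "comment"), group[0])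
--         for group in groups.values()
--     ]
-- ===== Notes on version B (the rewrite author's own statement) =====
-- stated objective: alternative
-- what changed: Replaces the single-pass keep-or-overwrite best-entry dict with a two-phase group-then-reduce: one pass builds a dict of (id,url) -> list of entries, a second pass picks each group's first 'comment' entry (else its first entry).
import Mathlib
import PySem

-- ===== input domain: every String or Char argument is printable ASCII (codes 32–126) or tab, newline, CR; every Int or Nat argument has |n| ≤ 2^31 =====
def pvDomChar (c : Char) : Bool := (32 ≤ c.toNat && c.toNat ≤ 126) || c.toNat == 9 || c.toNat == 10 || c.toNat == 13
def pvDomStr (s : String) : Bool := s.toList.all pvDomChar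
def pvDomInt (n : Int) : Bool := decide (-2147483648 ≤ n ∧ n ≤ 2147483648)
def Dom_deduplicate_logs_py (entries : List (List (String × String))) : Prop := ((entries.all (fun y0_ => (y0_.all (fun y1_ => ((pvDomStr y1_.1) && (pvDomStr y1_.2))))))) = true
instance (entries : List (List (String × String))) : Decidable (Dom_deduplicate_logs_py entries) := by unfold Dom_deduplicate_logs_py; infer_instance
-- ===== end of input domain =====

-- B replaces A's single-pass keep-or-overwrite dict with group-by-(id,url) then
-- pick each group's first "comment" entry (else its first entry); alternative
-- decomposition, same cost.


-- ===== PORT A =====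
-- entry.get(k, "") on the entry dict (assoc list, first match)
def pvEntryGet (e : List (String × String)) (k : String) : String :=
  (PySem.Dict.mk e).getD k ""

-- entry.get("type") == "comment"  (get with no default: None ≠ "comment" when key absent)
def pvIsComment (e : List (String × String)) : Bool :=
  (PySem.Dict.mk e).get? "type" == some "comment"

def deduplicate_logs_py (entries : List (List (String × String))) : List (List (String × String)) :=
  (entries.foldl
    (fun best_by_key entry =>
      let key := (pvEntryGet entry "id", pvEntryGet entry "url")
      match best_by_key.get? key with
      | none => best_by_key.insert key entry
      | some current =>
        let current_is_comment := pvIsComment current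
        let incoming_is_comment := pvIsComment entry
        if incoming_is_comment && !current_is_comment then best_by_key.insert key entry
        else best_by_key)
    PySem.Dict.empty).values

-- ===== PORT B =====
-- first entry of the group with type == "comment", else the group's first entry
def pvSelectRep (g : List (List (String × String))) : List (String × String) :=
  ((g.find? pvIsComment).getD (g.headD []))

def deduplicate_logs_py_alt (entries : List (List (String × String))) : List (List (String × String)) :=
  let groups := entries.foldl
    (fun groups entry =>
      groups.modify (pvEntryGet entry "id", pvEntryGet entry "url") [] (· ++ [entry]))
    PySem.Dict.empty
  groups.values.map pvSelectRep

-- ===== PRECONDITION & SPEC =====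
def Spec_deduplicate_logs_py (entries : List (List (String × String))) (out : List (List (String × String))) : Prop := out = deduplicate_logs_py_alt entries
instance (entries : List (List (String × String))) (out : List (List (String × String))) : Decidable (Spec_deduplicate_logs_py entries out) := by unfold Spec_deduplicate_logs_py; infer_instance

-- ===== CLAIM (what is proved, stated in full; the proofs are below) =====
def Claim_equal_deduplicate_logs_py : Prop := ∀ (entries : List (List (String × String))), Dom_deduplicate_logs_py entries → Spec_deduplicate_logs_py entries (deduplicate_logs_py entries)

-- ===== LEMMAS AND PROOFS =====

theorem selectRep_singleton (e : List (String × String)) : pvSelectRep [e] = e := by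
  unfold pvSelectRep
  by_cases h : pvIsComment e = true <;> simp [List.find?, h]

theorem selectRep_append (g : List (List (String × String))) (e : List (String × String))
    (hg : g ≠ []) :
    pvSelectRep (g ++ [e]) =
      (if pvIsComment e && !pvIsComment (pvSelectRep g) then e else pvSelectRep g) := by
  unfold pvSelectRep
  rcases hfind : g.find? pvIsComment with _ | c
  · have hall : ∀ x ∈ g, ¬ (pvIsComment x = true) := by
      intro x hx
      exact (List.find?_eq_none.mp hfind) x hx
    cases g with
    | nil => exact absurd rfl hg
    | cons a t =>
      have hheadc : pvIsComment a = false := Bool.eq_false_iff.mpr (hall a (by simp))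
      rw [List.find?_append, hfind]
      by_cases he : pvIsComment e = true
      · simp [List.find?, he, hheadc]
      · simp [List.find?, Bool.eq_false_iff.mpr he, hheadc]
  · have hc : pvIsComment c = true := List.find?_some hfind
    rw [List.find?_append, hfind]
    simp [hc]

-- the relation between A's dict and B's groups dict
def pvRel (dA : PySem.Dict (String × String) (List (String × String)))
    (dB : PySem.Dict (String × String) (List (List (String × String)))) : Prop :=
  dA.items = dB.items.map (fun p => (p.1, pvSelectRep p.2))

theorem rel_get?_aux (l : List ((String × String) × List (List (String × String))))
    (k : String × String) :
    (PySem.Dict.mk (l.map (fun p => (p.1, pvSelectRep p.2)))).get? k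
      = ((PySem.Dict.mk l).get? k).map pvSelectRep := by
  induction l with
  | nil => simp [PySem.Dict.get?]
  | cons p t ih =>
    rcases p with ⟨pk, pv⟩
    simp only [List.map_cons, PySem.Dict.get?_mk_cons]
    by_cases h : pk == k <;> simp [h, ih]

theorem rel_get? (dA : PySem.Dict (String × String) (List (String × String)))
    (dB : PySem.Dict (String × String) (List (List (String × String))))
    (h : pvRel dA dB) (k : String × String) :
    dA.get? k = (dB.get? k).map pvSelectRep := by
  have hA : dA = PySem.Dict.mk dA.items := by
    apply PySem.Dict.ext; rfl
  have hB : dB = PySem.Dict.mk dB.items := by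
    apply PySem.Dict.ext; rfl
  rw [hA, hB, h]
  exact rel_get?_aux dB.items k

-- the loop bodies of the two ports
def pvStepA (d : PySem.Dict (String × String) (List (String × String)))
    (e : List (String × String)) : PySem.Dict (String × String) (List (String × String)) :=
  match d.get? (pvEntryGet e "id", pvEntryGet e "url") with
  | none => d.insert (pvEntryGet e "id", pvEntryGet e "url") e
  | some current =>
    if pvIsComment e && !pvIsComment current then d.insert (pvEntryGet e "id", pvEntryGet e "url") e else d

def pvStepB (d : PySem.Dict (String × String) (List (List (String × String))))
    (e : List (String × String)) : PySem.Dict (String × String) (List (List (String × String))) :=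
  d.modify (pvEntryGet e "id", pvEntryGet e "url") [] (· ++ [e])

theorem loop_rel (l : List (List (String × String)))
    (dA : PySem.Dict (String × String) (List (String × String)))
    (dB : PySem.Dict (String × String) (List (List (String × String))))
    (hnodup : dB.keys.Nodup)
    (hne : ∀ p ∈ dB.items, p.2 ≠ [])
    (h : pvRel dA dB) :
    pvRel (l.foldl pvStepA dA) (l.foldl pvStepB dB) := by
  induction l generalizing dA dB with
  | nil => exact h
  | cons e t ih =>
    unfold pvRel at h
    simp only [List.foldl_cons]
    set k : String × String := (pvEntryGet e "id", pvEntryGet e "url") with hk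
    have hget := rel_get? dA dB h k
    have hmod : pvStepB dB e = dB.insert k (dB.getD k [] ++ [e]) := rfl
    rcases hB : dB.get? k with _ | g
    · -- fresh key
      have hgetD : dB.getD k [] = [] := PySem.Dict.getD_of_get?_eq_none _ _ hB
      have hcontB : dB.contains k = false := by
        rw [PySem.Dict.contains_eq_isSome_get?, hB]; rfl
      have hcontA : dA.contains k = false := by
        rw [PySem.Dict.contains_eq_isSome_get?, hget, hB]; rfl
      have hA' : pvStepA dA e = dA.insert k e := by
        unfold pvStepA; rw [← hk, hget, hB]; rfl
      rw [hA', hmod, hgetD]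
      apply ih
      · exact PySem.Dict.nodup_keys_insert dB k _ hnodup
      · intro p hp
        rcases (PySem.Dict.mem_items_insert _ _ _ _).mp hp with h1 | h2
        · rw [h1]; simp
        · exact hne p h2.1
      · unfold pvRel
        simp [PySem.Dict.items_insert, hcontB, hcontA, h, selectRep_singleton]
    · -- existing key
      have hgetD : dB.getD k [] = g := PySem.Dict.getD_of_get?_eq_some _ _ hB
      have hgne : g ≠ [] := hne (k, g) (PySem.Dict.mem_items_of_get?_eq_some _ hB)
      have hcontB : dB.contains k = true := by
        rw [PySem.Dict.contains_eq_isSome_get?, hB]; rfl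
      have hcontA : dA.contains k = true := by
        rw [PySem.Dict.contains_eq_isSome_get?, hget, hB]; rfl
      have hsel := selectRep_append g e hgne
      have hA0 : pvStepA dA e =
          (if pvIsComment e && !pvIsComment (pvSelectRep g) then dA.insert k e else dA) := by
        unfold pvStepA; rw [← hk, hget, hB]; rfl
      have hnodup' : (pvStepB dB e).keys.Nodup := by
        rw [hmod]; exact PySem.Dict.nodup_keys_insert dB k _ hnodup
      have hne' : ∀ p ∈ (pvStepB dB e).items, p.2 ≠ [] := by
        rw [hmod]
        intro p hp
        rcases (PySem.Dict.mem_items_insert _ _ _ _).mp hp with h1 | h2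
        · rw [h1]; simp
        · exact hne p h2.1
      apply ih _ _ hnodup' hne'
      rw [hA0, hmod, hgetD]
      by_cases hc : (pvIsComment e && !pvIsComment (pvSelectRep g)) = true
      · rw [if_pos hc]
        unfold pvRel
        simp only [PySem.Dict.items_insert, hcontB, hcontA, if_true]
        rw [h, List.map_map, List.map_map]
        apply List.map_congr_left
        intro p hp
        by_cases hpk : p.1 == k <;> simp [Function.comp, hpk, hsel, hc]
      · rw [if_neg hc]
        unfold pvRel
        simp only [PySem.Dict.items_insert, hcontB, if_true]
        rw [h, List.map_map]
        apply List.map_congr_left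
        intro p hp
        by_cases hpk : p.1 == k
        · have hkp : p.1 = k := by simpa using hpk
          have hmem : (p.1, p.2) ∈ dB.items := by simpa using hp
          have hpg : p.2 = g := by
            have h2 := PySem.Dict.get?_of_mem_items _ hmem hnodup
            rw [hkp, hB] at h2
            exact Option.some_injective _ h2.symm
          have hc' : (pvIsComment e && !pvIsComment (pvSelectRep g)) = false :=
            eq_false_of_ne_true hc
          simp [Function.comp, hsel, hc', hpg, hkp]
        · simp [Function.comp, hpk]

theorem values_eq_map_items {κ ν : Type} (d : PySem.Dict κ ν) :
    d.values = d.items.map (·.2) := rfl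

-- ===== VERDICT (by name: the statement is the Claim_ definition above) =====
theorem deduplicate_logs_py_spec : Claim_equal_deduplicate_logs_py := by
  intro entries _
  unfold Spec_deduplicate_logs_py deduplicate_logs_py deduplicate_logs_py_alt
  have h := loop_rel entries PySem.Dict.empty PySem.Dict.empty
    (by simp [PySem.Dict.keys_empty]) (by simp [PySem.Dict.empty]) (by rfl)
  have hA : (entries.foldl
      (fun best_by_key entry =>
        let key := (pvEntryGet entry "id", pvEntryGet entry "url")
        match best_by_key.get? key with
        | none => best_by_key.insert key entry
        | some current =>
          let current_is_comment := pvIsComment current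
          let incoming_is_comment := pvIsComment entry
          if incoming_is_comment && !current_is_comment then best_by_key.insert key entry
          else best_by_key)
      PySem.Dict.empty) = entries.foldl pvStepA PySem.Dict.empty := rfl
  have hB : (entries.foldl
      (fun groups entry =>
        groups.modify (pvEntryGet entry "id", pvEntryGet entry "url") [] (· ++ [entry]))
      PySem.Dict.empty) = entries.foldl pvStepB PySem.Dict.empty := rfl
  rw [hA, hB]
  unfold pvRel at h
  show (entries.foldl pvStepA PySem.Dict.empty).values
      = (entries.foldl pvStepB PySem.Dict.empty).values.map pvSelectRep
  rw [values_eq_map_items, values_eq_map_items, h, List.map_map, List.map_map]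
  rfl
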